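-- pv_equiv track=rewrite | github.com/cpp-rakesh/code_wars | kata/6kyu/encrypt_this.py | encrypt_this
-- ===== SOURCE A (Python) =====
-- def encrypt_this(t):
--     r = []
--     for w in t.split():
--         a = str(ord(w[0]))
--         if len(w) > 2:
--             a = a + w[-1]
--             a = a + w[2:len(w) - 1]
--             a = a + w[1]
--         elif len(w) == 2:
--             a = a + w[1]
--         r.append(a)
--     return ' '.join(r)
-- ===== SOURCE B (Python) =====
-- def _flush(out, word):
--     if not word:
--         return out
--     if out:
--         out += ' '
--     out += str(ord(word[0]))
--     n = len(word)
--     for k in range(1, n):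
--         out += word[n - 1 if k == 1 else (1 if k == n - 1 else k)]
--     return out
--
--
-- def encrypt_this(t):
--     out = ''
--     word = ''
--     for c in t:
--         if c.isspace():
--             out = _flush(out, word)
--             word = ''
--         else:
--             word += c
--     return _flush(out, word)
-- ===== Notes on version B (the rewrite author's own statement) =====
-- stated objective: alternative
-- what changed: Replaces A's split()/per-word three-way slice-concatenation/join pipeline by a single streaming scan over the characters with an (out, word) accumulator that flushes each completed word, emitting the word's tail character-by-character through an index permutation (second and last indices exchanged).
import Mathlib
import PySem

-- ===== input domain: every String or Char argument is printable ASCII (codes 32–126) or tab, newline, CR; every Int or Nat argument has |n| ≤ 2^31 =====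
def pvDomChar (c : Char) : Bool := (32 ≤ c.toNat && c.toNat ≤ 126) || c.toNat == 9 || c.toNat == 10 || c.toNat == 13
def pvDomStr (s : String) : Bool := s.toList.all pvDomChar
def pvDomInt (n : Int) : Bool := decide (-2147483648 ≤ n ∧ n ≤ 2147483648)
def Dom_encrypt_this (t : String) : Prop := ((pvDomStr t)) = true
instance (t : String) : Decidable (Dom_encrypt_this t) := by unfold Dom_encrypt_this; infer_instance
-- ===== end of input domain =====

-- B replaces A's split()/per-word slice-concatenation/join pipeline by one streaming scan
-- over the characters with an (out, word) accumulator, emitting each word's tail by an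
-- index permutation; same cost, different decomposition.


-- ===== PORT A =====
-- per-word body of A's loop; `pyGetD … ' '` is a totality guard only: every word
-- produced by split() is nonempty, so Python's w[0]/w[-1]/w[1] never raise here
def encWordA (w : List Char) : List Char :=
  let a := PySem.Int.toChars ((PySem.List.pyGetD w 0 ' ').toNat : Int)
  if 2 < w.length then
    a ++ [PySem.List.pyGetD w (-1) ' ']
      ++ PySem.List.slice w (some 2) (some ((w.length : Int) - 1))
      ++ [PySem.List.pyGetD w 1 ' ']
  else if w.length = 2 then
    a ++ [PySem.List.pyGetD w 1 ' ']
  else a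

def encrypt_this (t : String) : String :=
  let r := (PySem.Str.split₀ t).foldl (fun r w => r ++ [String.ofList (encWordA w.toList)]) []
  PySem.Str.join " " r

-- ===== PORT B =====
-- _flush of Source B; `pyGetD … ' '` is a totality guard only (all indices used are in range)
def flushB (out word : List Char) : List Char :=
  if word = [] then out
  else
    let out := if out = [] then out else out ++ [' ']
    let out := out ++ PySem.Int.toChars ((PySem.List.pyGetD word 0 ' ').toNat : Int)
    (PySem.List.pyRange 1 (word.length : Int) 1).foldl
      (fun o k => o ++ [PySem.List.pyGetD word
        (if k = 1 then (word.length : Int) - 1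
         else if k = (word.length : Int) - 1 then 1 else k) ' ']) out

-- body of Source B's `for c in t` loop, acting on the (out, word) state
def stepB (st : List Char × List Char) (c : Char) : List Char × List Char :=
  if PySem.Chars.isspace c then (flushB st.1 st.2, []) else (st.1, st.2 ++ [c])

def encrypt_this_alt (t : String) : String :=
  let st := t.toList.foldl stepB ([], [])
  String.ofList (flushB st.1 st.2)

-- ===== PRECONDITION & SPEC =====
def Spec_encrypt_this (t : String) (out : String) : Prop := out = encrypt_this_alt t
instance (t : String) (out : String) : Decidable (Spec_encrypt_this t out) := by unfold Spec_encrypt_this; infer_instance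

-- ===== CLAIM (what is proved, stated in full; the proofs are below) =====
def Claim_equal_encrypt_this : Prop := ∀ (t : String), Dom_encrypt_this t → Spec_encrypt_this t (encrypt_this t)

-- ===== LEMMAS AND PROOFS =====

theorem toDigitsCore_len_le (b f n : Nat) (ds : List Char) :
    ds.length ≤ (Nat.toDigitsCore b f n ds).length := by
  induction f generalizing n ds with
  | zero => simp [Nat.toDigitsCore]
  | succ f ih =>
    rw [Nat.toDigitsCore]
    split
    · simp
    · exact le_trans (by simp) (ih _ _)

theorem toDigits_ne_nil (b n : Nat) : Nat.toDigits b n ≠ [] := by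
  have h : 0 < (Nat.toDigits b n).length := by
    rw [Nat.toDigits, Nat.toDigitsCore]
    split
    · simp
    · exact lt_of_lt_of_le (by simp) (toDigitsCore_len_le _ _ _ _)
  intro hnil
  rw [hnil] at h
  simp at h

theorem encWordA_ne_nil (w : List Char) : encWordA w ≠ [] := by
  have ha : PySem.Int.toChars ((PySem.List.pyGetD w 0 ' ').toNat : Int) ≠ [] := by
    simp [PySem.Int.toChars]
    exact toDigits_ne_nil 10 _
  unfold encWordA
  split_ifs <;> simp [ha]

-- the tail emitted by Source B's index-permutation loop equals A's slice concatenation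
theorem tail_eq (w : List Char) (hw : w ≠ []) :
    (PySem.List.pyRange 1 (w.length : Int) 1).map
      (fun k => PySem.List.pyGetD w
        (if k = 1 then (w.length : Int) - 1
         else if k = (w.length : Int) - 1 then 1 else k) ' ')
      = (if 2 < w.length then
          [PySem.List.pyGetD w (-1) ' ']
            ++ PySem.List.slice w (some 2) (some ((w.length : Int) - 1))
            ++ [PySem.List.pyGetD w 1 ' ']
        else if w.length = 2 then [PySem.List.pyGetD w 1 ' '] else []) := by
  match w with
  | [c] => simp [pysem, PySem.List.pyGetD, PySem.List.pyRange_one_eq_nil]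
  | [c, d] =>
    have h2 : PySem.List.pyRange 1 2 = [1] := by decide
    simp [h2, PySem.List.pyGetD]
  | c :: d :: e :: rest =>
    obtain ⟨mid, lst, hml⟩ : ∃ mid lst, e :: rest = mid ++ [lst] :=
      ⟨(e::rest).dropLast, (e::rest).getLast (by simp), (List.dropLast_append_getLast (by simp)).symm⟩
    rw [show c :: d :: e :: rest = c :: d :: (e :: rest) from rfl, hml]
    have hlen : (c :: d :: (mid ++ [lst])).length = mid.length + 3 := by simp
    rw [hlen]
    have hrange : PySem.List.pyRange 1 (((mid.length + 3 : Nat) : Int)) 1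
        = 1 :: (PySem.List.pyRange 2 ((mid.length : Int)+2) 1 ++ [(mid.length:Int)+2]) := by
      rw [PySem.List.pyRange_one_cons (by push_cast; omega)]
      rw [show (((mid.length + 3 : Nat)) : Int) = ((mid.length:Int)+2)+1 by push_cast; ring]
      rw [PySem.List.pyRange_one_succ_right (by omega)]
      norm_num
    rw [hrange]
    rw [if_pos (by simp : 2 < mid.length + 3)]
    simp only [List.map_cons, List.map_append]
    congr 1
    · -- g 1 = w[-1]
      rw [if_pos trivial]
      have hneg := PySem.List.pyGetD_neg_natCast (c :: d :: (mid ++ [lst])) 1 ' '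
        (by omega) (by simp)
      norm_num at hneg
      rw [hneg, PySem.List.pyGetD_eq_getElem _ _ (by push_cast; omega) (by push_cast; simp; omega)]
      have hidx : ((mid.length:Int) + 3).toNat - 1 = mid.length + 2 := by omega
      simp [hidx]
    congr 1
    · -- middle
      rw [PySem.List.slice_toNat _ (a := 2) (b := ((mid.length+3:Nat):Int) - 1) (by norm_num) (by push_cast; omega)]
      have hb : ((((mid.length+3:Nat)):Int) - 1).toNat = mid.length + 2 := by omega
      rw [hb]
      have hmid2 : ([] : List Char).append
          (List.take (mid.length + 2 - Int.toNat 2) (List.drop (Int.toNat 2) (c :: d :: (mid ++ [lst])))) = mid := by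
        simp [List.take_left']
      rw [hmid2]
      rw [List.map_congr_left (g := fun k => PySem.List.pyGetD (c :: d :: (mid ++ [lst])) k ' ')
        (fun k hk => by
          rw [PySem.List.mem_pyRange_one] at hk
          rw [if_neg (by omega), if_neg (by push_cast; omega)])]
      rw [PySem.List.pyRange_one 2 ((mid.length:Int)+2)]
      have hc : (((mid.length:Int)+2) - 2).toNat = mid.length := by omega
      rw [hc, List.map_map]
      apply List.ext_getElem (by simp)
      intro i h1 h2
      simp only [List.getElem_map, List.getElem_range, Function.comp]
      rw [PySem.List.pyGetD_eq_getElem _ _ (by omega) (by simp; omega)]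
      have hi : ((2:Int) + i).toNat = i + 2 := by omega
      simp at h1
      simp [hi, List.getElem_append_left, h1]
    · -- g (N+2) = w[1]
      rw [if_neg (by omega), if_pos (by push_cast; ring)]
      rw [PySem.List.pyGetD_eq_getElem _ _ (by omega) (by simp; omega)]
      simp

theorem flushB_eq (out word : List Char) (hw : word ≠ []) :
    flushB out word = (if out = [] then out else out ++ [' ']) ++ encWordA word := by
  rw [flushB, if_neg hw]
  simp only []
  rw [PySem.List.foldl_append_singleton_eq_map, tail_eq word hw]
  unfold encWordA
  split_ifs <;> simp

-- every word produced by split() is nonempty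
theorem split₀_go_ne_nil (s : List Char) : ∀ (cur : List Char) (acc : List (List Char)),
    (∀ w ∈ acc, w ≠ []) → ∀ w ∈ PySem.Chars.split₀.go s cur acc, w ≠ [] := by
  induction s with
  | nil =>
    intro cur acc hacc w hw
    rw [PySem.Chars.split₀.go] at hw
    by_cases h : cur.isEmpty
    · simp [h] at hw
      exact hacc w hw
    · simp [h] at hw
      rcases hw with hw | hw
      · exact hacc w hw
      · subst hw; simp [List.isEmpty_iff] at h ⊢; exact h
  | cons c rest ih =>
    intro cur acc hacc w hw
    rw [PySem.Chars.split₀.go] at hw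
    by_cases hs : PySem.Chars.isspace c
    · by_cases h : cur.isEmpty
      · simp only [hs, h, if_true] at hw
        exact ih [] acc hacc w hw
      · simp only [hs, h, if_true] at hw
        refine ih [] (cur.reverse :: acc) ?_ w hw
        intro v hv
        rcases List.mem_cons.mp hv with rfl | hv
        · simp [List.isEmpty_iff] at h ⊢; exact h
        · exact hacc _ hv
    · simp only [hs] at hw
      exact ih (c :: cur) acc hacc w hw

theorem flushB_nil (out : List Char) : flushB out [] = out := rfl

-- split₀.go's accumulator can be pulled out front
theorem split₀_go_acc (s : List Char) : ∀ (cur : List Char) (acc : List (List Char)),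
    PySem.Chars.split₀.go s cur acc = acc.reverse ++ PySem.Chars.split₀.go s cur [] := by
  induction s with
  | nil =>
    intro cur acc
    rw [PySem.Chars.split₀.go, PySem.Chars.split₀.go]
    by_cases h : cur.isEmpty = true
    · rw [if_pos h, if_pos h]; simp
    · rw [if_neg h, if_neg h]; simp
  | cons c rest ih =>
    intro cur acc
    rw [PySem.Chars.split₀.go, PySem.Chars.split₀.go]
    cases hs : PySem.Chars.isspace c
    · simp only [Bool.false_eq_true, if_false]
      exact ih (c :: cur) acc
    · simp only [if_true]
      by_cases h : cur.isEmpty = true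
      · rw [if_pos h, if_pos h]; exact ih [] acc
      · rw [if_neg h, if_neg h, ih [] (cur.reverse :: acc), ih [] [cur.reverse]]; simp

-- main loop invariant: the streaming scan equals flushing the words split₀ produces
theorem scan_eq (s : List Char) : ∀ (out word : List Char),
    (fun st : List Char × List Char => flushB st.1 st.2) (s.foldl stepB (out, word))
      = (PySem.Chars.split₀.go s word.reverse []).foldl flushB out := by
  induction s with
  | nil =>
    intro out word
    rw [PySem.Chars.split₀.go]
    by_cases h : word = []
    · subst h; simp [flushB_nil]
    · have h' : word.reverse.isEmpty = false := by simp [h]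
      simp only [h', Bool.false_eq_true, if_false, List.reverse_cons, List.reverse_nil,
        List.nil_append, List.reverse_reverse, List.foldl_cons, List.foldl_nil]
  | cons c rest ih =>
    intro out word
    rw [PySem.Chars.split₀.go]
    cases hs : PySem.Chars.isspace c
    · simp only [List.foldl_cons, stepB, hs, Bool.false_eq_true, if_false]
      simpa [List.reverse_append] using ih out (word ++ [c])
    · by_cases h : word = []
      · subst h
        simp only [List.foldl_cons, stepB, hs, if_true]
        simpa [flushB_nil] using ih (flushB out []) []
      · have h' : word.reverse.isEmpty = false := by simp [h]
        simp only [List.foldl_cons, stepB, hs, if_true, h', Bool.false_eq_true, if_false,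
          List.reverse_reverse]
        rw [split₀_go_acc rest [] [word]]
        simpa using ih (flushB out word) []

theorem intercalate_cons_flat (l : List (List Char)) (a : List Char) :
    List.intercalate [' '] (a :: l) = a ++ (l.map (fun w => ' ' :: w)).flatten := by
  induction l generalizing a with
  | nil => simp [List.intercalate]
  | cons b l ih =>
    rw [show List.intercalate [' '] (a :: b :: l) = a ++ [' '] ++ List.intercalate [' '] (b :: l)
      by simp [List.intercalate], ih b]
    simp

theorem foldl_flushB_ne (ws : List (List Char)) : ∀ (out : List Char), out ≠ [] →
    (∀ w ∈ ws, w ≠ []) →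
    ws.foldl flushB out = out ++ ((ws.map encWordA).map (fun w => ' ' :: w)).flatten := by
  induction ws with
  | nil => intro out _ _; simp
  | cons w ws ih =>
    intro out hout hws
    have hw : w ≠ [] := hws w (by simp)
    rw [List.foldl_cons, flushB_eq out w hw, if_neg hout,
      ih _ (by simp [hout]) (fun v hv => hws v (by simp [hv]))]
    simp

theorem foldl_flushB_nil (ws : List (List Char)) (h : ∀ w ∈ ws, w ≠ []) :
    ws.foldl flushB [] = PySem.Chars.join [' '] (ws.map encWordA) := by
  cases ws with
  | nil => simp [PySem.Chars.join, List.intercalate]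
  | cons w ws =>
    have hw : w ≠ [] := h w (by simp)
    rw [List.foldl_cons, flushB_eq [] w hw, if_pos rfl, List.nil_append,
      foldl_flushB_ne ws (encWordA w) (encWordA_ne_nil w) (fun v hv => h v (by simp [hv]))]
    rw [PySem.Chars.join, List.map_cons, intercalate_cons_flat]

-- ===== VERDICT (by name: the statement is the Claim_ definition above) =====
theorem encrypt_this_spec : Claim_equal_encrypt_this := by
  intro t _
  unfold Spec_encrypt_this encrypt_this encrypt_this_alt
  rw [PySem.List.foldl_append_singleton_eq_map]
  simp only [List.nil_append]
  have hB := scan_eq t.toList [] []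
  simp only [List.reverse_nil] at hB
  have hwords : ∀ w ∈ PySem.Chars.split₀.go t.toList [] [], w ≠ [] :=
    split₀_go_ne_nil t.toList [] [] (by simp)
  rw [PySem.Str.join]
  simp only [hB]
  rw [foldl_flushB_nil _ hwords]
  congr 1
  have hmap : (PySem.Str.split₀ t).map (String.toList ∘ fun w => String.ofList (encWordA w.toList))
      = (PySem.Chars.split₀.go t.toList [] []).map encWordA := by
    rw [show PySem.Chars.split₀.go t.toList [] [] = PySem.Chars.split₀ t.toList from rfl,
      ← PySem.Str.split₀_map_toList, List.map_map]
    apply List.map_congr_left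
    intro w _
    simp [pysem]
  rw [List.map_map, hmap]
  rfl
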